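-- pv_equiv track=rewrite | github.com/rsuth/adventofcode2020 | day6/day6.py | read_groups
-- ===== SOURCE A (Python) =====
-- def read_groups(answers):
--   current_group = set()
--   groups = []
--   answers.append('\n')
--   for l in answers:
--     if l != '\n':
--       for c in l.strip():
--         current_group.add(c)
--     else:
--       groups.append(len(current_group))
--       current_group = set()
--   return groups
-- ===== SOURCE B (Python) =====
-- def read_groups(answers):
--     # Two-pass re-implementation: partition into blank-separated groups, then count.
--     answers.append('\n')
--     groups = []
--     cur = []
--     for l in answers:
--         if l == '\n':
--             groups.append(cur)
--             cur = []
--         else: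
--             cur.append(l)
--     return [len(set(''.join(line.strip() for line in group))) for group in groups]
-- ===== Notes on version B (the rewrite author's own statement) =====
-- stated objective: alternative
-- what changed: Replaces A's single pass with running character-set state by a two-pass decomposition: first partition the lines into blank-separated groups, then map each group to the size of the set of its stripped characters; B performs the same answers.append mutation.
import Mathlib
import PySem

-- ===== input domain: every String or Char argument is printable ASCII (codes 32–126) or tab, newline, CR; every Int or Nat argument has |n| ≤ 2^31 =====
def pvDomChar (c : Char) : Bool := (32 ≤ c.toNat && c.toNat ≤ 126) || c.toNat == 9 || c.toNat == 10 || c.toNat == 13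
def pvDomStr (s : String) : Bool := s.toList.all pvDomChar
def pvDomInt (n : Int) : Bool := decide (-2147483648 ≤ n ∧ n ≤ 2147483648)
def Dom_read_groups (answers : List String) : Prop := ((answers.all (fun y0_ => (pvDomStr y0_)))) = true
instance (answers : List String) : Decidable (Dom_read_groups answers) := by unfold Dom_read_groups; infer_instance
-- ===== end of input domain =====

-- B: same result via a two-pass decomposition (partition into groups, then count); B performs
-- the same answers.append('\n') mutation in Python; the equivalence proved is about the return value.
-- ===== PORT A =====
def readGroupsLoop : List String → PySem.Set Char → List Int
  | [], _ => []
  | l :: rest, cg =>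
    if l ≠ "\n" then
      readGroupsLoop rest ((PySem.Str.strip l).toList.foldl PySem.Set.add cg)
    else
      (PySem.Set.len cg) :: readGroupsLoop rest PySem.Set.empty

def read_groups (answers : List String) : List Int :=
  readGroupsLoop (answers ++ ["\n"]) PySem.Set.empty

-- ===== PORT B =====
def splitBlank : List String → List String → List (List String)
  | [], _ => []
  | l :: rest, cur =>
    if l == "\n" then cur :: splitBlank rest []
    else splitBlank rest (cur ++ [l])

def groupCount (g : List String) : Int :=
  PySem.Set.len (PySem.Set.ofList (g.flatMap (fun line => (PySem.Str.strip line).toList)))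

def read_groups_alt (answers : List String) : List Int :=
  (splitBlank (answers ++ ["\n"]) []).map groupCount

-- ===== PRECONDITION & SPEC =====
def Spec_read_groups (answers : List String) (out : List Int) : Prop := out = read_groups_alt answers
instance (answers : List String) (out : List Int) : Decidable (Spec_read_groups answers out) := by unfold Spec_read_groups; infer_instance

-- ===== CLAIM (what is proved, stated in full; the proofs are below) =====
def Claim_equal_read_groups : Prop := ∀ (answers : List String), Dom_read_groups answers → Spec_read_groups answers (read_groups answers)

-- ===== LEMMAS AND PROOFS =====

-- ===== VERDICT (by name: the statement is the Claim_ definition above) =====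
lemma loop_eq_split : ∀ (ls cur : List String),
    readGroupsLoop ls (PySem.Set.ofList (cur.flatMap (fun line => (PySem.Str.strip line).toList)))
      = (splitBlank ls cur).map groupCount := by
  intro ls
  induction ls with
  | nil => intro cur; simp [readGroupsLoop, splitBlank]
  | cons l rest ih =>
    intro cur
    by_cases h : l = "\n"
    · subst h
      simp [readGroupsLoop, splitBlank, groupCount]
      simpa using ih []
    · have hb : (l == "\n") = false := by simp [h]
      simp [readGroupsLoop, splitBlank, h, hb]
      have := ih (cur ++ [l])
      rw [← this]
      congr 1
      simp [PySem.Set.ofList_eq_foldl, List.foldl_append]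

theorem read_groups_spec : Claim_equal_read_groups := by
  intro answers _
  unfold Spec_read_groups read_groups read_groups_alt
  simpa using loop_eq_split (answers ++ ["\n"]) []
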